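-- pv_equiv track=rewrite | github.com/lasion07/lasion07 | Bai1.py | ss10
-- ===== SOURCE A (Python) =====
-- def ss10(num1, num2):
--     pos1 = set()
--     pos2 = set()
--     def vt(num, pos):
--         p = 0
--         for i in str(num):
--             if i == '0' or i == '1':
--                 pos.add(p+1)
--             p += 1
--
--     vt(num1, pos1)
--     vt(num2, pos2)
--     return pos1 == pos2
-- ===== SOURCE B (Python) =====
-- def ss10(num1, num2):
--     s1, s2 = str(num1), str(num2)
--     n = max(len(s1), len(s2))
--     return all(
--         (i < len(s1) and s1[i] in '01') == (i < len(s2) and s2[i] in '01')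
--         for i in range(n)
--     )
-- ===== Notes on version B (the rewrite author's own statement) =====
-- stated objective: alternative
-- what changed: Replaces the two position sets and set-equality comparison with a single parallel index scan comparing the 0/1-digit indicator of both digit strings position by position.
import Mathlib
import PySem

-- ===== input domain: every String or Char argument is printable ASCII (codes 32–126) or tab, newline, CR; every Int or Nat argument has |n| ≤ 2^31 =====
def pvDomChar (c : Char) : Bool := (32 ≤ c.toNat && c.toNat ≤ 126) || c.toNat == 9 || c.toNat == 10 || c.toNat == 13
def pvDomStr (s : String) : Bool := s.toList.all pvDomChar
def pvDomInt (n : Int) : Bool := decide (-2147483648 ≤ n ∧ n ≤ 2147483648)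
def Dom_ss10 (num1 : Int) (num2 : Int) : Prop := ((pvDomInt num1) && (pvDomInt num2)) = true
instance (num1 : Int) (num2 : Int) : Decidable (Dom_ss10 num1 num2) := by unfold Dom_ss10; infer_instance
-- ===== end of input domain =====

-- B replaces A's two position sets and set comparison by a single parallel
-- index scan comparing the 0/1-digit indicators of the two digit strings
-- (objective: alternative decomposition, same cost).

-- ===== PORT A =====
-- vt(num, pos): walk str(num), adding position p+1 to the set for each '0'/'1' digit
def pvVt (cs : List Char) : PySem.Set Int :=
  (cs.foldl
    (fun (st : PySem.Set Int × Int) i =>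
      (if i == '0' || i == '1' then PySem.Set.add st.1 (st.2 + 1) else st.1, st.2 + 1))
    (PySem.Set.empty, 0)).1

def ss10 (num1 : Int) (num2 : Int) : Bool :=
  PySem.Set.equal (pvVt (PySem.Int.toChars num1)) (pvVt (PySem.Int.toChars num2))

-- ===== PORT B =====
-- (i < len(s) and s[i] in '01')
def pvIndAt (cs : List Char) (i : Nat) : Bool :=
  if h : i < cs.length then (cs[i] == '0' || cs[i] == '1') else false

def ss10_alt (num1 : Int) (num2 : Int) : Bool :=
  let s1 := PySem.Int.toChars num1
  let s2 := PySem.Int.toChars num2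
  (List.range (max s1.length s2.length)).all (fun i => pvIndAt s1 i == pvIndAt s2 i)

-- ===== PRECONDITION & SPEC =====
def Spec_ss10 (num1 : Int) (num2 : Int) (out : Bool) : Prop := out = ss10_alt num1 num2
instance (num1 : Int) (num2 : Int) (out : Bool) : Decidable (Spec_ss10 num1 num2 out) := by unfold Spec_ss10; infer_instance

-- ===== CLAIM (what is proved, stated in full; the proofs are below) =====
def Claim_equal_ss10 : Prop := ∀ (num1 : Int) (num2 : Int), Dom_ss10 num1 num2 → Spec_ss10 num1 num2 (ss10 num1 num2)

-- ===== LEMMAS AND PROOFS =====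

-- membership in A's fold: positions p+k+1 of 0/1 digits, plus the starting set
theorem pvVt_fold_mem (cs : List Char) (s : PySem.Set Int) (p x : Int) :
    x ∈ (cs.foldl
      (fun (st : PySem.Set Int × Int) i =>
        (if i == '0' || i == '1' then PySem.Set.add st.1 (st.2 + 1) else st.1, st.2 + 1))
      (s, p)).1 ↔
    x ∈ s ∨ ∃ (k : Nat) (h : k < cs.length), (cs[k] == '0' || cs[k] == '1') = true ∧ x = p + k + 1 := by
  induction cs generalizing s p with
  | nil => simp
  | cons c cs ih =>
    simp only [List.foldl_cons]
    rw [ih]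
    constructor
    · rintro (hx | ⟨k, hk, hc, hxk⟩)
      · by_cases hc : (c == '0' || c == '1') = true
        · simp only [hc, if_pos] at hx
          rcases (PySem.Set.mem_add _ _ _).1 hx with hx | hx
          · exact Or.inl hx
          · refine Or.inr ⟨0, by simp, by simpa using hc, ?_⟩
            push_cast
            omega
        · simp only [if_neg hc] at hx
          exact Or.inl hx
      · refine Or.inr ⟨k + 1, by simp; omega, by simpa using hc, ?_⟩
        push_cast
        omega
    · rintro (hx | ⟨k, hk, hc, hxk⟩)
      · left
        split
        · exact (PySem.Set.mem_add _ _ _).2 (Or.inl hx)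
        · exact hx
      · cases k with
        | zero =>
          left
          simp only [List.getElem_cons_zero] at hc
          simp only [hc, if_pos]
          refine (PySem.Set.mem_add _ _ _).2 (Or.inr (by omega))
        | succ k =>
          refine Or.inr ⟨k, by simp at hk; omega, by simpa using hc, ?_⟩
          push_cast at hxk ⊢
          omega

theorem pvVt_mem (cs : List Char) (x : Int) :
    x ∈ pvVt cs ↔ ∃ (k : Nat) (h : k < cs.length), (cs[k] == '0' || cs[k] == '1') = true ∧ x = k + 1 := by
  unfold pvVt
  rw [pvVt_fold_mem]
  constructor
  · rintro (hx | ⟨k, hk, hc, hxk⟩)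
    · simp [PySem.Set.empty] at hx
    · exact ⟨k, hk, hc, by omega⟩
  · rintro ⟨k, hk, hc, hxk⟩
    exact Or.inr ⟨k, hk, hc, by omega⟩

theorem pvIndAt_true_iff (cs : List Char) (i : Nat) :
    pvIndAt cs i = true ↔ ∃ (h : i < cs.length), (cs[i] == '0' || cs[i] == '1') = true := by
  unfold pvIndAt
  split
  · simp [*]
  · simp [*]

theorem pvIndAt_mem_iff (cs : List Char) (i : Nat) :
    pvIndAt cs i = true ↔ ((i : Int) + 1) ∈ pvVt cs := by
  rw [pvIndAt_true_iff, pvVt_mem]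
  constructor
  · rintro ⟨h, hc⟩; exact ⟨i, h, hc, rfl⟩
  · rintro ⟨k, hk, hc, hx⟩
    have : k = i := by omega
    subst this
    exact ⟨hk, hc⟩

theorem ss10_true_iff (num1 num2 : Int) :
    ss10 num1 num2 = true ↔
      ∀ i : Nat, pvIndAt (PySem.Int.toChars num1) i = pvIndAt (PySem.Int.toChars num2) i := by
  unfold ss10
  rw [PySem.Set.equal_iff]
  constructor
  · intro h i
    have := h ((i : Int) + 1)
    rw [← pvIndAt_mem_iff, ← pvIndAt_mem_iff] at this
    cases h1 : pvIndAt (PySem.Int.toChars num1) i <;>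
      cases h2 : pvIndAt (PySem.Int.toChars num2) i <;> simp_all
  · intro h x
    rw [pvVt_mem, pvVt_mem]
    constructor
    · rintro ⟨k, hk, hc, hx⟩
      have h1 : pvIndAt (PySem.Int.toChars num1) k = true := (pvIndAt_true_iff _ _).2 ⟨hk, hc⟩
      have h2 := (pvIndAt_true_iff _ _).1 (h k ▸ h1)
      exact ⟨k, h2.1, h2.2, hx⟩
    · rintro ⟨k, hk, hc, hx⟩
      have h2 : pvIndAt (PySem.Int.toChars num2) k = true := (pvIndAt_true_iff _ _).2 ⟨hk, hc⟩
      have h1 := (pvIndAt_true_iff _ _).1 ((h k).symm ▸ h2)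
      exact ⟨k, h1.1, h1.2, hx⟩

theorem ss10_alt_true_iff (num1 num2 : Int) :
    ss10_alt num1 num2 = true ↔
      ∀ i : Nat, pvIndAt (PySem.Int.toChars num1) i = pvIndAt (PySem.Int.toChars num2) i := by
  unfold ss10_alt
  simp only [List.all_eq_true, List.mem_range, beq_iff_eq]
  constructor
  · intro h i
    by_cases hi : i < max (PySem.Int.toChars num1).length (PySem.Int.toChars num2).length
    · exact h i hi
    · have h1 : pvIndAt (PySem.Int.toChars num1) i = false := by
        unfold pvIndAt; rw [dif_neg (by omega)]
      have h2 : pvIndAt (PySem.Int.toChars num2) i = false := by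
        unfold pvIndAt; rw [dif_neg (by omega)]
      rw [h1, h2]
  · intro h i _
    exact h i

-- ===== VERDICT (by name: the statement is the Claim_ definition above) =====
theorem ss10_spec : Claim_equal_ss10 := by
  intro num1 num2 _
  unfold Spec_ss10
  cases ha : ss10_alt num1 num2
  · cases hb : ss10 num1 num2
    · rfl
    · exact absurd ((ss10_alt_true_iff _ _).2 ((ss10_true_iff _ _).1 hb)) (by simp [ha])
  · exact (ss10_true_iff _ _).2 ((ss10_alt_true_iff _ _).1 ha)
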